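-- pv_equiv track=rewrite | github.com/mmercalde/prng_cluster_public | patch_bayesian_optimizer.py | find_class_boundaries
-- ===== SOURCE A (Python) =====
-- def find_class_boundaries(content, class_name):
--     """Find start and end of a class definition"""
--     lines = content.split('\n')
--     start_idx = None
--     end_idx = None
--     indent_level = None
--
--     for i, line in enumerate(lines):
--         # Find class definition
--         if f"class {class_name}" in line and line.strip().startswith('class'):
--             start_idx = i
--             # Determine indentation level
--             indent_level = len(line) - len(line.lstrip())
--             continue
--
--         # Find end of class (next class or function at same/lower indent)
--         if start_idx is not None and end_idx is None:
--             stripped = line.lstrip()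
--             current_indent = len(line) - len(stripped)
--
--             # Check if we've hit the end (next top-level item or end of file)
--             if stripped and not stripped.startswith('#'):
--                 if current_indent <= indent_level and (stripped.startswith('class ') or stripped.startswith('def ')):
--                     end_idx = i
--                     break
--
--     # If we reached end of file
--     if start_idx is not None and end_idx is None:
--         end_idx = len(lines)
--
--     return start_idx, end_idx
-- ===== SOURCE B (Python) =====
-- def find_class_boundaries(content, class_name):
--     """Find start and end of a class definition (index matches first, then scan segments)"""
--     lines = content.split('\n')
--     needle = "class " + class_name
--     matches = [i for i, l in enumerate(lines)
--                if needle in l and l.strip().startswith('class')]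
--     if not matches:
--         return None, None
--     for m, nm in zip(matches, matches[1:] + [len(lines)]):
--         indent = len(lines[m]) - len(lines[m].lstrip())
--         for i in range(m + 1, nm):
--             stripped = lines[i].lstrip()
--             if stripped and not stripped.startswith('#'):
--                 if len(lines[i]) - len(stripped) <= indent and \
--                    (stripped.startswith('class ') or stripped.startswith('def ')):
--                     return m, i
--     return matches[-1], len(lines)
-- ===== Notes on version B (the rewrite author's own statement) =====
-- stated objective: alternative
-- what changed: Replaced A's single stateful pass (start/indent state with a continue-sentinel and in-loop break) by an index-then-scan decomposition: first collect all class-match line indices, then scan each inter-match segment for the end line, with an explicit last-match/end-of-file fallback.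
import Mathlib
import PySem

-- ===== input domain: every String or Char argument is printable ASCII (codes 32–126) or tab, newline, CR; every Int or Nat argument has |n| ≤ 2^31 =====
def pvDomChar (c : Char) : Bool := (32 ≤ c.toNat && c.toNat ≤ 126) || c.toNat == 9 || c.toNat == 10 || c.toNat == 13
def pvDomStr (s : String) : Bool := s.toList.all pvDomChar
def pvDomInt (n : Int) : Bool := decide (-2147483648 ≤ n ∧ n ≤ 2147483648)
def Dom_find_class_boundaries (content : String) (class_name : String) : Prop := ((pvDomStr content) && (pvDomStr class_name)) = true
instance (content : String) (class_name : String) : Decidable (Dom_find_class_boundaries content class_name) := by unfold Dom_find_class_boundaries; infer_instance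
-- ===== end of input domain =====

-- B re-decomposes A's single stateful scan (start/indent/continue sentinel) into: collect all
-- class-match indices first, then scan each inter-match segment for the end line; same values.

-- shared predicate helpers: both Pythons contain these exact expressions
-- "class {class_name}" in line and line.strip().startswith('class')
def pvMatch (needle : List Char) (line : List Char) : Bool :=
  PySem.Chars.isIn needle line && PySem.Chars.startswith (PySem.Chars.strip line) ("class".toList)

-- len(line) - len(line.lstrip())
def pvIndent (line : List Char) : Nat := line.length - (PySem.Chars.lstrip line).length

-- stripped and not stripped.startswith('#') and current_indent <= indent_level and (…'class ' or …'def ')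
def pvEnd (ind : Nat) (line : List Char) : Bool :=
  let stripped := PySem.Chars.lstrip line
  !stripped.isEmpty && !PySem.Chars.startswith stripped ("#".toList) &&
    (decide (line.length - stripped.length ≤ ind) &&
      (PySem.Chars.startswith stripped ("class ".toList) || PySem.Chars.startswith stripped ("def ".toList)))

-- ===== PORT A =====
-- A's for-loop: state = (start_idx, indent_level) (set together), early break on the end line
def pvLoopA (needle : List Char) (n : Nat) :
    List (List Char) → Nat → Option (Nat × Nat) → Option Int × Option Int
  | [], _, none => (none, none)
  | [], _, some (s, _) => (some (s : Int), some (n : Int))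
  | l :: t, i, st =>
    if pvMatch needle l then pvLoopA needle n t (i + 1) (some (i, pvIndent l))
    else
      match st with
      | some (s, ind) =>
          if pvEnd ind l then (some (s : Int), some (i : Int))
          else pvLoopA needle n t (i + 1) (some (s, ind))
      | none => pvLoopA needle n t (i + 1) none

def find_class_boundaries (content : String) (class_name : String) : Option Int × Option Int :=
  let lines := PySem.Chars.splitOn content.toList ("\n".toList)
  pvLoopA ("class ".toList ++ class_name.toList) lines.length lines 0 none

-- ===== PORT B =====
-- matches = [i for i, l in enumerate(lines) if …]
def pvMatchIdx (needle : List Char) : List (List Char) → Nat → List Nat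
  | [], _ => []
  | l :: t, i =>
    if pvMatch needle l then i :: pvMatchIdx needle t (i + 1) else pvMatchIdx needle t (i + 1)

-- inner 'for i in range(lo, hi)' with early return; lines[i] is always in range here
def pvScan (lines : List (List Char)) (ind : Nat) (i b : Nat) : Option Nat :=
  if _h : i < b then
    if pvEnd ind (lines.getD i []) then some i else pvScan lines ind (i + 1) b
  else none
termination_by b - i

-- outer loop over zip(matches, matches[1:] + [len(lines)]); fallback (matches[-1], len(lines))
def pvGo (lines : List (List Char)) (n : Nat) : Nat → List Nat → Option Int × Option Int
  | m, [] =>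
      match pvScan lines (pvIndent (lines.getD m [])) (m + 1) n with
      | some i => (some (m : Int), some (i : Int))
      | none => (some (m : Int), some (n : Int))
  | m, m' :: rest =>
      match pvScan lines (pvIndent (lines.getD m [])) (m + 1) m' with
      | some i => (some (m : Int), some (i : Int))
      | none => pvGo lines n m' rest

def find_class_boundaries_alt (content : String) (class_name : String) : Option Int × Option Int :=
  let lines := PySem.Chars.splitOn content.toList ("\n".toList)
  match pvMatchIdx ("class ".toList ++ class_name.toList) lines 0 with
  | [] => (none, none)
  | m :: rest => pvGo lines lines.length m rest

-- ===== PRECONDITION & SPEC =====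
def Spec_find_class_boundaries (content : String) (class_name : String) (out : Option Int × Option Int) : Prop := out = find_class_boundaries_alt content class_name
instance (content : String) (class_name : String) (out : Option Int × Option Int) : Decidable (Spec_find_class_boundaries content class_name out) := by unfold Spec_find_class_boundaries; infer_instance

-- ===== CLAIM (what is proved, stated in full; the proofs are below) =====
def Claim_equal_find_class_boundaries : Prop := ∀ (content : String) (class_name : String), Dom_find_class_boundaries content class_name → Spec_find_class_boundaries content class_name (find_class_boundaries content class_name)

-- ===== LEMMAS AND PROOFS =====

-- B's state after a segment head m with indent ind, about to scan from index i, remaining matches ms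
def pvH (lines : List (List Char)) (n s ind i : Nat) (ms : List Nat) : Option Int × Option Int :=
  match ms with
  | [] =>
      match pvScan lines ind i n with
      | some j => (some (s : Int), some (j : Int))
      | none => (some (s : Int), some (n : Int))
  | m' :: rest =>
      match pvScan lines ind i m' with
      | some j => (some (s : Int), some (j : Int))
      | none => pvGo lines n m' rest

theorem pvMatchIdx_lb (needle : List Char) :
    ∀ (t : List (List Char)) (i m : Nat), m ∈ pvMatchIdx needle t i → i ≤ m := by
  intro t
  induction t with
  | nil => intro i m h; simp [pvMatchIdx] at h
  | cons l t ih =>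
    intro i m h
    simp only [pvMatchIdx] at h
    split at h
    · rcases List.mem_cons.1 h with h | h
      · omega
      · have := ih (i + 1) m h; omega
    · have := ih (i + 1) m h; omega

theorem pvGo_eq_H (lines : List (List Char)) (n m : Nat) (rest : List Nat) :
    pvGo lines n m rest = pvH lines n m (pvIndent (lines.getD m [])) (m + 1) rest := by
  cases rest <;> rfl

theorem pvScan_step (lines : List (List Char)) (ind i b : Nat) (hib : i < b)
    (hne : pvEnd ind (lines.getD i []) = false) :
    pvScan lines ind i b = pvScan lines ind (i + 1) b := by
  rw [pvScan, dif_pos hib, hne]; simp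

theorem pvScan_hit (lines : List (List Char)) (ind i b : Nat) (hib : i < b)
    (he : pvEnd ind (lines.getD i []) = true) :
    pvScan lines ind i b = some i := by
  rw [pvScan, dif_pos hib, he]; simp

theorem loopA_eq_H (needle : List Char) (lines : List (List Char)) :
    ∀ (t : List (List Char)) (i s ind : Nat), t = lines.drop i →
      pvLoopA needle lines.length t i (some (s, ind)) =
        pvH lines lines.length s ind i (pvMatchIdx needle t i) := by
  intro t
  induction t with
  | nil =>
    intro i s ind hdrop
    have hle : lines.length ≤ i := by
      have := List.drop_eq_nil_iff.1 hdrop.symm; omega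
    have hscan : pvScan lines ind i lines.length = none := by
      rw [pvScan]; simp [Nat.not_lt.2 hle]
    simp only [pvLoopA, pvMatchIdx, pvH, hscan]
  | cons l t ih =>
    intro i s ind hdrop
    have hget : lines[i]? = some l := by
      have h0 : (List.drop i lines)[0]? = lines[i + 0]? := List.getElem?_drop
      rw [← hdrop] at h0
      simpa using h0.symm
    have hlt : i < lines.length := by
      have := List.getElem?_eq_some_iff.1 hget
      exact this.1
    have hgetD : lines.getD i [] = l := by
      simp [List.getD_eq_getElem?_getD, hget]
    have hdrop' : t = lines.drop (i + 1) := by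
      have h1 : List.drop 1 (List.drop i lines) = List.drop (i + 1) lines := by
        rw [List.drop_drop]
      rw [← hdrop] at h1
      simpa using h1
    by_cases hm : pvMatch needle l
    · -- the line is a class-match: A resets its state, B starts a new segment
      have lhs : pvLoopA needle lines.length (l :: t) i (some (s, ind)) =
          pvLoopA needle lines.length t (i + 1) (some (i, pvIndent l)) := by
        simp [pvLoopA, hm]
      have hscan0 : pvScan lines ind i i = none := by
        rw [pvScan]; simp
      have rhs : pvH lines lines.length s ind i (pvMatchIdx needle (l :: t) i) =
          pvGo lines lines.length i (pvMatchIdx needle t (i + 1)) := by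
        simp [pvMatchIdx, hm, pvH, hscan0]
      rw [lhs, rhs, pvGo_eq_H, hgetD, ih (i + 1) i (pvIndent l) hdrop']
    · have hmi : pvMatchIdx needle (l :: t) i = pvMatchIdx needle t (i + 1) := by
        simp [pvMatchIdx, hm]
      by_cases hE : pvEnd ind l
      · -- end line found: A breaks; B's segment scan hits the same index
        have lhs : pvLoopA needle lines.length (l :: t) i (some (s, ind)) =
            (some (s : Int), some (i : Int)) := by
          simp [pvLoopA, hm, hE]
        rw [lhs, hmi]
        cases hms : pvMatchIdx needle t (i + 1) with
        | nil =>
          have := pvScan_hit lines ind i lines.length hlt (by rw [hgetD]; exact hE)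
          simp only [pvH, this]
        | cons m' rest =>
          have hm' : i < m' := by
            have : m' ∈ pvMatchIdx needle t (i + 1) := by rw [hms]; exact List.mem_cons_self
            have := pvMatchIdx_lb needle t (i + 1) m' this; omega
          have := pvScan_hit lines ind i m' hm' (by rw [hgetD]; exact hE)
          simp only [pvH, this]
      · -- ordinary line: both sides step past it
        have lhs : pvLoopA needle lines.length (l :: t) i (some (s, ind)) =
            pvLoopA needle lines.length t (i + 1) (some (s, ind)) := by
          simp [pvLoopA, hm, hE]
        rw [lhs, hmi, ih (i + 1) s ind hdrop']
        have hEd : pvEnd ind (lines.getD i []) = false := by rw [hgetD]; exact Bool.not_eq_true _ ▸ (by simpa using hE)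
        cases hms : pvMatchIdx needle t (i + 1) with
        | nil =>
          have := pvScan_step lines ind i lines.length hlt hEd
          simp only [pvH, this]
        | cons m' rest =>
          have hm' : i < m' := by
            have : m' ∈ pvMatchIdx needle t (i + 1) := by rw [hms]; exact List.mem_cons_self
            have := pvMatchIdx_lb needle t (i + 1) m' this; omega
          have := pvScan_step lines ind i m' hm' hEd
          simp only [pvH, this]

theorem loopA_none (needle : List Char) (lines : List (List Char)) :
    ∀ (t : List (List Char)) (i : Nat), t = lines.drop i →
      pvLoopA needle lines.length t i none =
        (match pvMatchIdx needle t i with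
         | [] => (none, none)
         | m :: rest => pvGo lines lines.length m rest) := by
  intro t
  induction t with
  | nil => intro i _; simp [pvLoopA, pvMatchIdx]
  | cons l t ih =>
    intro i hdrop
    have hget : lines[i]? = some l := by
      have h0 : (List.drop i lines)[0]? = lines[i + 0]? := List.getElem?_drop
      rw [← hdrop] at h0
      simpa using h0.symm
    have hgetD : lines.getD i [] = l := by
      simp [List.getD_eq_getElem?_getD, hget]
    have hdrop' : t = lines.drop (i + 1) := by
      have h1 : List.drop 1 (List.drop i lines) = List.drop (i + 1) lines := by
        rw [List.drop_drop]
      rw [← hdrop] at h1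
      simpa using h1
    by_cases hm : pvMatch needle l
    · have lhs : pvLoopA needle lines.length (l :: t) i none =
          pvLoopA needle lines.length t (i + 1) (some (i, pvIndent l)) := by
        simp [pvLoopA, hm]
      have hmi : pvMatchIdx needle (l :: t) i = i :: pvMatchIdx needle t (i + 1) := by
        simp [pvMatchIdx, hm]
      rw [lhs, hmi, loopA_eq_H needle lines t (i + 1) i (pvIndent l) hdrop']
      simp only []
      rw [pvGo_eq_H, hgetD]
    · have lhs : pvLoopA needle lines.length (l :: t) i none =
          pvLoopA needle lines.length t (i + 1) none := by
        simp [pvLoopA, hm]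
      have hmi : pvMatchIdx needle (l :: t) i = pvMatchIdx needle t (i + 1) := by
        simp [pvMatchIdx, hm]
      rw [lhs, hmi, ih (i + 1) hdrop']

-- ===== VERDICT (by name: the statement is the Claim_ definition above) =====
theorem find_class_boundaries_spec : Claim_equal_find_class_boundaries := by
  intro content class_name _
  unfold Spec_find_class_boundaries find_class_boundaries find_class_boundaries_alt
  exact loopA_none ("class ".toList ++ class_name.toList)
    (PySem.Chars.splitOn content.toList ("\n".toList))
    (PySem.Chars.splitOn content.toList ("\n".toList)) 0 rfl
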